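-- pv_equiv track=rewrite | github.com/FHSU-AustinHoward/aes-cipher-decipher | rsa/rsa_keygen.py | get_nth_prime_in_range
-- ===== SOURCE A (Python) =====
-- import math
--
-- def is_prime(n):
--     if n < 2:
--         return False
--     if n == 2:
--         return True
--     if n % 2 == 0:
--         return False
--     for i in range(3, int(math.sqrt(n)) + 1, 2):
--         if n % i == 0:
--             return False
--     return True
--
-- def get_nth_prime_in_range(start, end, n):
--     count = 0
--     for i in range(start, end + 1):
--         if is_prime(i):
--             count += 1
--             if count == n:
--                 return i
--     return None
-- ===== SOURCE B (Python) =====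
-- def get_nth_prime_in_range(start, end, n):
--     # Segmented sieve: process [max(start,2), end] in fixed-size blocks; in each
--     # block mark composites by striding over each divisor's multiples, then scan
--     # the unmarked numbers, returning as soon as the nth prime is counted.
--     if n < 1:
--         return None
--     count = 0
--     lo = max(start, 2)
--     while lo <= end:
--         hi = min(lo + 65535, end)
--         composite = set()
--         d = 2
--         while d * d <= hi:
--             first = max(d * d, ((lo + d - 1) // d) * d)
--             composite.update(range(first, hi + 1, d))
--             d += 1
--         for m in range(lo, hi + 1):
--             if m not in composite:
--                 count += 1
--                 if count == n:
--                     return m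
--         lo = hi + 1
--     return None
-- ===== Notes on version B (the rewrite author's own statement) =====
-- stated objective: alternative
-- what changed: A trial-divides every candidate in [start,end] up to its square root; B runs a segmented sieve: the range is processed in fixed-size blocks, each d with d*d <= hi marks its multiples in a composite set, and the unmarked numbers are scanned for the nth prime (intended as faster; a timing run measured 2.81x at the largest size but not consistently across inputs).
import Mathlib
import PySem

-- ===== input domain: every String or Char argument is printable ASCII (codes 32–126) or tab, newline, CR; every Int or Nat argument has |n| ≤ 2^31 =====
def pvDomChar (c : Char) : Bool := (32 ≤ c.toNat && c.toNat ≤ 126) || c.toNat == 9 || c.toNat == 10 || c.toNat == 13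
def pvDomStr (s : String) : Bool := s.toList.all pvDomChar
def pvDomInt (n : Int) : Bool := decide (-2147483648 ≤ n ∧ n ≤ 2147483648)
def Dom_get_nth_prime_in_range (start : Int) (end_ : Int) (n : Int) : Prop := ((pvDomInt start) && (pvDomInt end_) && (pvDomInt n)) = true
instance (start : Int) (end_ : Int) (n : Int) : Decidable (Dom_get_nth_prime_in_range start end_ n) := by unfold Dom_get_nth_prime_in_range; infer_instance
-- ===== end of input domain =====

-- B replaces A's per-candidate trial division by a segmented sieve: [max(start,2), end] is
-- processed in fixed-size blocks; in each block every d with d*d ≤ hi marks its multiples in a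
-- composite set, then the unmarked numbers are scanned, returning at the nth (alternative algorithm).


-- ===== PORT A =====
-- is_prime from Source A.  int(math.sqrt(n)) is ported as Nat.sqrt n.toNat: exact on the domain
-- (the loop is only reached for 3 ≤ n ≤ 2^31, where the double sqrt rounds to the integer sqrt).
def pvIsPrimeA (n : Int) : Bool :=
  if n < 2 then false
  else if n = 2 then true
  else if PySem.Int.mod n 2 = 0 then false
  else (PySem.List.pyRange 3 ((Nat.sqrt n.toNat : Int) + 1) 2).all
         (fun i => !(PySem.Int.mod n i = 0))

-- the for-loop of A with its running counter and early return
def pvGoA (n : Int) : List Int → Int → Option Int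
  | [], _ => none
  | i :: rest, count =>
    if pvIsPrimeA i then
      if count + 1 = n then some i else pvGoA n rest (count + 1)
    else pvGoA n rest count

def get_nth_prime_in_range (start : Int) (end_ : Int) (n : Int) : Option Int :=
  pvGoA n (PySem.List.pyRange start (end_ + 1) 1) 0

-- ===== PORT B =====
-- the 'while d * d <= hi' marking loop of Source B: composite.update(range(first, hi+1, d))
def pvSieve (end_ lo : Int) (d : Int) (s : PySem.Set Int) : PySem.Set Int :=
  if _h : d * d ≤ end_ then
    pvSieve end_ lo (d + 1)
      (PySem.Set.update s
        (PySem.List.pyRange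
          (max (d * d) (PySem.Int.floordiv (lo + d - 1) d * d)) (end_ + 1) d))
  else s
  termination_by (end_ + 1 - d).toNat
  decreasing_by
    have : d ≤ end_ := by nlinarith [sq_nonneg d, sq_nonneg (d - 1)]
    omega

-- the per-block scanning for-loop of Source B: returns the early result and the updated counter
def pvScanB (n : Int) (s : PySem.Set Int) : List Int → Int → Option Int × Int
  | [], count => (none, count)
  | m :: rest, count =>
    if !(PySem.Set.contains s m) then
      if count + 1 = n then (some m, count + 1) else pvScanB n s rest (count + 1)
    else pvScanB n s rest count

-- the 'while lo <= end' block loop of Source B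
def pvBlocks (end_ n : Int) (lo : Int) (count : Int) : Option Int :=
  if _h : lo ≤ end_ then
    let hi := min (lo + 65535) end_
    match pvScanB n (pvSieve hi lo 2 PySem.Set.empty)
        (PySem.List.pyRange lo (hi + 1) 1) count with
    | (some m, _) => some m
    | (none, c) => pvBlocks end_ n (hi + 1) c
  else none
  termination_by (end_ + 1 - lo).toNat
  decreasing_by omega

def get_nth_prime_in_range_alt (start : Int) (end_ : Int) (n : Int) : Option Int :=
  if n < 1 then none
  else pvBlocks end_ n (max start 2) 0

-- ===== PRECONDITION & SPEC =====
def Spec_get_nth_prime_in_range (start : Int) (end_ : Int) (n : Int) (out : Option Int) : Prop := out = get_nth_prime_in_range_alt start end_ n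
instance (start : Int) (end_ : Int) (n : Int) (out : Option Int) : Decidable (Spec_get_nth_prime_in_range start end_ n out) := by unfold Spec_get_nth_prime_in_range; infer_instance

-- ===== CLAIM (what is proved, stated in full; the proofs are below) =====
def Claim_equal_get_nth_prime_in_range : Prop := ∀ (start : Int) (end_ : Int) (n : Int), Dom_get_nth_prime_in_range start end_ n → Spec_get_nth_prime_in_range start end_ n (get_nth_prime_in_range start end_ n)

-- ===== LEMMAS AND PROOFS =====

-- A's trial division decided: true iff m ≥ 2 with no divisor e ≥ 2, e*e ≤ m
theorem pvIsPrimeA_iff (m : Int) :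
    pvIsPrimeA m = true ↔ 2 ≤ m ∧ ∀ e : Int, 2 ≤ e → e * e ≤ m → ¬ e ∣ m := by
  unfold pvIsPrimeA
  by_cases h2 : m < 2
  · simp only [h2, if_true, Bool.false_eq_true, false_iff, not_and]
    intro h; omega
  · rw [not_lt] at h2
    by_cases heq : m = 2
    · subst heq
      rw [if_neg (by omega : ¬ (2:Int) < 2), if_pos rfl]
      constructor
      · intro _
        exact ⟨le_refl 2, fun e he hee _ => by nlinarith⟩
      · intro _; rfl
    · have h3 : 3 ≤ m := by omega
      rw [if_neg (by omega), if_neg heq]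
      by_cases hev : PySem.Int.mod m 2 = 0
      · have hdvd : (2 : Int) ∣ m := (PySem.Int.mod_eq_zero_iff_dvd m 2).mp hev
        rw [if_pos hev]
        simp only [Bool.false_eq_true, false_iff, not_and, not_forall]
        intro _
        obtain ⟨k, hk⟩ := hdvd
        exact ⟨2, by omega, by omega, fun h => h ⟨k, hk⟩⟩
      · rw [if_neg hev]
        have hodd : ¬ (2 : Int) ∣ m := fun hd => hev ((PySem.Int.mod_eq_zero_iff_dvd m 2).mpr hd)
        have hsq : ∀ e : Int, 0 < e → (e * e ≤ m ↔ e ≤ (Nat.sqrt m.toNat : Int)) := by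
          intro e he
          have hm : ((m.toNat : Nat) : Int) = m := Int.toNat_of_nonneg (by omega)
          have he' : ((e.toNat : Nat) : Int) = e := Int.toNat_of_nonneg (by omega)
          constructor
          · intro hee
            have h1 : e.toNat * e.toNat ≤ m.toNat := by
              have h0 : ((e.toNat * e.toNat : Nat) : Int) ≤ ((m.toNat : Nat) : Int) := by
                push_cast; rw [he', hm]; exact hee
              exact_mod_cast h0
            have := Nat.le_sqrt.mpr h1
            omega
          · intro hle
            have h1 : e.toNat ≤ Nat.sqrt m.toNat := by omega
            have h2' := Nat.le_sqrt.mp h1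
            have h0 : ((e.toNat * e.toNat : Nat) : Int) ≤ ((m.toNat : Nat) : Int) := by
              exact_mod_cast h2'
            push_cast at h0
            rw [he', hm] at h0
            exact h0
        rw [List.all_eq_true]
        constructor
        · intro hall
          refine ⟨by omega, fun e he hee hed => ?_⟩
          have heodd : ¬ (2 : Int) ∣ e := fun h => hodd (h.trans hed)
          have he3 : 3 ≤ e := by
            rcases lt_or_eq_of_le he with h | h
            · omega
            · exact absurd (h ▸ dvd_refl 2) heodd
          have hmem : e ∈ PySem.List.pyRange 3 ((Nat.sqrt m.toNat : Int) + 1) 2 := by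
            rw [PySem.List.mem_pyRange_iff_of_pos (by norm_num)]
            refine ⟨he3, by have := (hsq e (by omega)).mp hee; omega, ?_⟩
            rcases Int.even_or_odd e with h | h
            · exact absurd h.two_dvd heodd
            · rcases h with ⟨k, hk⟩; exact ⟨k - 1, by omega⟩
          have := hall e hmem
          rw [Bool.not_eq_true', decide_eq_false_iff_not] at this
          exact this ((PySem.Int.mod_eq_zero_iff_dvd m e).mpr hed)
        · rintro ⟨-, hno⟩ i hi
          rw [PySem.List.mem_pyRange_iff_of_pos (by norm_num)] at hi
          obtain ⟨hi3, hiu, -⟩ := hi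
          rw [Bool.not_eq_true', decide_eq_false_iff_not]
          intro hmod
          exact hno i (by omega) ((hsq i (by omega)).mpr (by omega))
            ((PySem.Int.mod_eq_zero_iff_dvd m i).mp hmod)

-- membership in B's sieve set
theorem mem_pvSieve (end_ lo : Int) (hlo : 2 ≤ lo) (d : Int) (hd : 2 ≤ d)
    (s : PySem.Set Int) (m : Int) :
    m ∈ pvSieve end_ lo d s ↔
      m ∈ s ∨ ∃ e : Int, d ≤ e ∧ e * e ≤ end_ ∧ e ∣ m ∧ e * e ≤ m ∧ lo ≤ m ∧ m ≤ end_ := by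
  rw [pvSieve]
  by_cases h : d * d ≤ end_
  · rw [dif_pos h, mem_pvSieve end_ lo hlo (d + 1) (by omega) _ m,
      PySem.Set.mem_update, PySem.List.mem_pyRange_iff_of_pos (by omega : (0:Int) < d)]
    have hc1 := PySem.Int.floordiv_mul_add_mod (lo + d - 1) d
    have hc2 := PySem.Int.mod_nonneg (lo + d - 1) (by omega : (0:Int) < d)
    have hc3 := PySem.Int.mod_lt (lo + d - 1) (by omega : (0:Int) < d)
    set c := PySem.Int.floordiv (lo + d - 1) d with hc
    have hcd1 : lo ≤ c * d := by omega
    have hcd2 : c * d ≤ lo + d - 1 := by omega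
    have hdvdfirst : d ∣ max (d * d) (c * d) := by
      rcases max_cases (d * d) (c * d) with ⟨he, -⟩ | ⟨he, -⟩ <;> rw [he]
      · exact Dvd.intro_left d rfl
      · exact Dvd.intro_left c rfl
    constructor
    · rintro ((hm | ⟨hfirst, hlt, hdvd⟩) | ⟨e, he, hee, hed, heem, hlom, hmend⟩)
      · exact Or.inl hm
      · have hdm : d ∣ m := by
          have := dvd_add hdvd hdvdfirst
          simpa using this
        exact Or.inr ⟨d, le_refl d, h, hdm,
          le_trans (le_max_left _ _) hfirst,
          le_trans (le_trans hcd1 (le_max_right _ _)) hfirst, by omega⟩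
      · exact Or.inr ⟨e, by omega, hee, hed, heem, hlom, hmend⟩
    · rintro (hm | ⟨e, he, hee, hed, heem, hlom, hmend⟩)
      · exact Or.inl (Or.inl hm)
      · rcases lt_or_eq_of_le he with hlt | heq
        -- e > d : goes to the recursive disjunct
        · exact Or.inr ⟨e, by omega, hee, hed, heem, hlom, hmend⟩
        -- e = d : m is a marked multiple of d
        · subst heq
          rcases hed with ⟨k, hk⟩
          have hcdm : c * d ≤ m := by
            by_contra hcon
            have hcon' : m < c * d := by omega
            have hkc : k < c := by
              have hlt2 : d * k < d * c := by
                calc d * k = m := hk.symm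
                _ < c * d := hcon'
                _ = d * c := by ring
              exact lt_of_mul_lt_mul_left hlt2 (by omega)
            have hmle : m ≤ d * (c - 1) := by
              rw [hk]
              exact mul_le_mul_of_nonneg_left (by omega) (by omega)
            nlinarith
          refine Or.inl (Or.inr ⟨max_le heem hcdm, by omega, ?_⟩)
          exact dvd_sub ⟨k, hk⟩ hdvdfirst
  · rw [dif_neg h]
    simp only [iff_self_or]
    rintro ⟨e, he1, he2, -, -, -, -⟩
    exact absurd he2 (by nlinarith)
  termination_by (end_ + 1 - d).toNat
  decreasing_by
    have : d ≤ end_ := by nlinarith [sq_nonneg d, sq_nonneg (d - 1)]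
    omega

-- B's block scan equals A's scan when the membership test agrees with is_prime on the list,
-- and on a miss its counter has advanced by the number of primes seen
theorem pvScanB_eq_pvGoA (n : Int) (s : PySem.Set Int) (l : List Int) (c : Int)
    (h : ∀ m ∈ l, (!(PySem.Set.contains s m)) = pvIsPrimeA m) :
    (pvScanB n s l c).1 = pvGoA n l c ∧
      ((pvScanB n s l c).1 = none →
        (pvScanB n s l c).2 = c + (l.countP (fun m => pvIsPrimeA m))) := by
  induction l generalizing c with
  | nil => exact ⟨rfl, fun _ => by simp [pvScanB]⟩
  | cons m rest ih =>
    have h' := fun x hx => h x (List.mem_cons_of_mem m hx)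
    have hm := h m (List.mem_cons_self ..)
    by_cases hp : pvIsPrimeA m
    · by_cases hc : c + 1 = n
      · rw [show pvScanB n s (m :: rest) c = (some m, c + 1) from by
            rw [pvScanB, hm]; simp [hp, hc]]
        refine ⟨?_, fun hcon => by simp at hcon⟩
        rw [pvGoA]; simp [hp, hc]
      · rw [show pvScanB n s (m :: rest) c = pvScanB n s rest (c + 1) from by
            rw [pvScanB, hm]; simp [hp, hc]]
        refine ⟨?_, fun hnone => ?_⟩
        · rw [(ih (c + 1) h').1, pvGoA]; simp [hp, hc]
        · rw [(ih (c + 1) h').2 hnone, List.countP_cons]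
          simp only [hp]
          push_cast
          omega
    · rw [show pvScanB n s (m :: rest) c = pvScanB n s rest c from by
          rw [pvScanB, hm]; simp [hp]]
      refine ⟨?_, fun hnone => ?_⟩
      · rw [(ih c h').1, pvGoA]; simp [hp]
      · rw [(ih c h').2 hnone, List.countP_cons]
        simp [hp]

-- A's scan over a concatenation
theorem pvGoA_append (n : Int) (l1 l2 : List Int) (c : Int) :
    pvGoA n (l1 ++ l2) c =
      match pvGoA n l1 c with
      | some m => some m
      | none => pvGoA n l2 (c + (l1.countP (fun m => pvIsPrimeA m))) := by
  induction l1 generalizing c with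
  | nil => simp [pvGoA]
  | cons m rest ih =>
    rw [List.cons_append, pvGoA, pvGoA, List.countP_cons]
    by_cases hp : pvIsPrimeA m
    · rw [if_pos hp, if_pos hp]
      by_cases hc : c + 1 = n
      · rw [if_pos hc, if_pos hc]
      · rw [if_neg hc, if_neg hc, ih (c + 1)]
        simp only [hp]
        norm_num
        rw [show c + 1 + rest.countP (fun m => pvIsPrimeA m)
            = c + (rest.countP (fun m => pvIsPrimeA m) + 1) from by omega]
    · simp only [hp, Bool.false_eq_true, if_false, ih c]
      norm_num

-- the block loop of B computes A's scan from lo with the carried counter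
theorem pvBlocks_eq_pvGoA (end_ n : Int) (lo : Int) (hlo : 2 ≤ lo) (c : Int) :
    pvBlocks end_ n lo c = pvGoA n (PySem.List.pyRange lo (end_ + 1) 1) c := by
  by_cases h : lo ≤ end_
  · have hstep : pvBlocks end_ n lo c =
        match pvScanB n (pvSieve (min (lo + 65535) end_) lo 2 PySem.Set.empty)
            (PySem.List.pyRange lo ((min (lo + 65535) end_) + 1) 1) c with
        | (some m, _) => some m
        | (none, c') => pvBlocks end_ n ((min (lo + 65535) end_) + 1) c' := by
      rw [pvBlocks, dif_pos h]
    have hhi1 : lo ≤ min (lo + 65535) end_ := by omega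
    have hhi2 : min (lo + 65535) end_ ≤ end_ := by omega
    have key : ∀ m ∈ PySem.List.pyRange lo ((min (lo + 65535) end_) + 1) 1,
        (!(PySem.Set.contains
          (pvSieve (min (lo + 65535) end_) lo 2 PySem.Set.empty) m)) = pvIsPrimeA m := by
      intro m hm
      rw [PySem.List.mem_pyRange_one] at hm
      have hmem := mem_pvSieve (min (lo + 65535) end_) lo hlo 2 (le_refl 2) PySem.Set.empty m
      rw [Bool.eq_iff_iff, Bool.not_eq_true', ← Bool.not_eq_true,
        PySem.Set.contains_iff, hmem, pvIsPrimeA_iff]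
      simp only [PySem.Set.empty, List.not_mem_nil, false_or, not_exists]
      constructor
      · intro hno
        refine ⟨by omega, fun e he hee hed => ?_⟩
        exact hno e ⟨he, by omega, hed, hee, by omega, by omega⟩
      · rintro ⟨-, hno⟩ e ⟨he1, he2, he3, he4, -, -⟩
        exact hno e he1 he4 he3
    obtain ⟨hfst, hsnd⟩ := pvScanB_eq_pvGoA n _ (PySem.List.pyRange lo ((min (lo + 65535) end_) + 1) 1) c key
    rw [hstep,
      PySem.List.pyRange_one_append lo ((min (lo + 65535) end_) + 1) (end_ + 1) (by omega) (by omega),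
      pvGoA_append]
    rcases hscan : pvScanB n (pvSieve (min (lo + 65535) end_) lo 2 PySem.Set.empty)
        (PySem.List.pyRange lo ((min (lo + 65535) end_) + 1) 1) c with ⟨_ | m, c'⟩
    · rw [hscan] at hfst hsnd
      simp only at hfst
      have hc' : c' = c + (PySem.List.pyRange lo ((min (lo + 65535) end_) + 1) 1).countP
          (fun m => pvIsPrimeA m) := by simpa using hsnd
      rw [← hfst, hc']
      exact pvBlocks_eq_pvGoA end_ n ((min (lo + 65535) end_) + 1) (by omega) _
    · rw [hscan] at hfst
      simp only at hfst
      rw [← hfst]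
  · rw [pvBlocks, dif_neg h]
    rw [show PySem.List.pyRange lo (end_ + 1) 1 = [] from by
      rw [PySem.List.pyRange_one]; simp; omega]
    rfl
  termination_by (end_ + 1 - lo).toNat
  decreasing_by omega

-- A's scan skips a prefix of non-primes
theorem pvGoA_skip (n : Int) (l1 l2 : List Int) (c : Int)
    (h : ∀ m ∈ l1, pvIsPrimeA m = false) :
    pvGoA n (l1 ++ l2) c = pvGoA n l2 c := by
  induction l1 with
  | nil => rfl
  | cons m rest ih =>
    rw [List.cons_append, pvGoA, h m (List.mem_cons_self ..)]
    simp only [Bool.false_eq_true, if_false]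
    exact ih (fun x hx => h x (List.mem_cons_of_mem m hx))

-- A's scan returns none when the target count is already unreachable
theorem pvGoA_none (n : Int) (l : List Int) (c : Int) (h : n ≤ c) :
    pvGoA n l c = none := by
  induction l generalizing c with
  | nil => rfl
  | cons m rest ih =>
    rw [pvGoA]
    split_ifs with h1 h2
    · omega
    · exact ih (c + 1) (by omega)
    · exact ih c h

-- ===== VERDICT (by name: the statement is the Claim_ definition above) =====
theorem get_nth_prime_in_range_spec : Claim_equal_get_nth_prime_in_range := by
  intro start end_ n _
  unfold Spec_get_nth_prime_in_range get_nth_prime_in_range get_nth_prime_in_range_alt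
  by_cases hn : n < 1
  · rw [if_pos hn]
    exact pvGoA_none n _ 0 (by omega)
  · rw [if_neg hn]
    rw [pvBlocks_eq_pvGoA end_ n (max start 2) (le_max_right _ _) 0]
    by_cases hs : 2 ≤ start
    · rw [max_eq_left hs]
    · rw [not_le] at hs
      rw [max_eq_right (by omega)]
      by_cases he : 2 ≤ (end_ + 1)
      · rw [PySem.List.pyRange_one_append start 2 (end_ + 1) (by omega) he]
        apply pvGoA_skip
        intro m hm
        rw [PySem.List.mem_pyRange_one] at hm
        unfold pvIsPrimeA
        rw [if_pos (by omega)]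
      · rw [show PySem.List.pyRange 2 (end_ + 1) 1 = [] from by
          rw [PySem.List.pyRange_one]; simp; omega]
        rw [← List.append_nil (PySem.List.pyRange start (end_ + 1) 1)]
        apply pvGoA_skip
        intro m hm
        rw [PySem.List.mem_pyRange_one] at hm
        unfold pvIsPrimeA
        rw [if_pos (by omega)]
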